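-- pv_equiv track=rewrite | github.com/hydrokin/mnemonic-saver | mnemonic.py | replace_question_marks
-- ===== SOURCE A (Python) =====
-- def replace_question_marks(word, replacements):
--     results = []
--     for replacement in replacements:
--         replaced_word = word
--         for r in replacement:
--             replaced_word = replaced_word.replace('?', r, 1)
--         results.append(replaced_word)
--     return results
-- ===== SOURCE B (Python) =====
-- def replace_question_marks(word, replacements):
--     # One linear pass per replacement: pop chars off a stack; a '?' consumes the
--     # next replacement element (its chars are pushed back, so any '?' it contains
--     # is itself replaceable by later elements, exactly as repeated .replace does).
--     results = []
--     for replacement in replacements: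
--         it = iter(replacement)
--         stack = list(reversed(word))
--         out = []
--         while stack:
--             c = stack.pop()
--             if c == '?':
--                 r = next(it, None)
--                 if r is None:
--                     out.append(c)
--                 else:
--                     stack.extend(reversed(r))
--             else:
--                 out.append(c)
--         results.append(''.join(out))
--     return results
-- ===== Notes on version B (the rewrite author's own statement) =====
-- stated objective: alternative
-- what changed: Replaces the repeated full-string .replace('?', r, 1) scans with a single left-to-right pass per replacement using an explicit stack and an iterator over the replacement elements; pushed-back replacement text keeps inserted '?' replaceable, so behaviour is exactly A's.
import Mathlib
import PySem

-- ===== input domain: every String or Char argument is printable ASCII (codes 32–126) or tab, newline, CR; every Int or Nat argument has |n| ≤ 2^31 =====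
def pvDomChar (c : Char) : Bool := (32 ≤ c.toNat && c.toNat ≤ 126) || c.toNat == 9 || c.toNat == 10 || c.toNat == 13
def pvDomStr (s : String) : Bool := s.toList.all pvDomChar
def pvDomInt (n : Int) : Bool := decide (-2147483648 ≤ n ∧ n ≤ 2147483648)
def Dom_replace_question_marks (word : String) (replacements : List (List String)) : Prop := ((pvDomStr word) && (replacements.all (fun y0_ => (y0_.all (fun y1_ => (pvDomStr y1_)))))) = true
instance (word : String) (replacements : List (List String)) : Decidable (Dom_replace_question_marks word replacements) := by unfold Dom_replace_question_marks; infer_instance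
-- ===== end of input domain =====

-- B re-implements A with a single stack pass per replacement instead of repeated .replace scans (objective: alternative).

-- ===== PORT A =====
-- hand port of Python's s.replace('?', r, 1): replace the FIRST occurrence of '?';
-- exact here because the pattern is the single character '?'.
def pvRepl1 : List Char → List Char → List Char
  | [], _ => []
  | c :: rest, r => if c = '?' then r ++ rest else c :: pvRepl1 rest r

def replace_question_marks (word : String) (replacements : List (List String)) : List String :=
  replacements.foldl
    (fun results replacement =>
      results ++ [String.mk (replacement.foldl (fun rw r => pvRepl1 rw r.toList) word.toList)])
    []

-- ===== PORT B =====
-- Source B's while loop. The Lean list `stack` has as head what the Python stack pops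
-- next (Python's `list(reversed(word))` popped from the end = `word` read from the
-- front); `out` accumulates in reverse, reversed at the end (Python appends and joins).
def pvAltLoop (stack : List Char) (reps : List String) (out : List Char) : List Char :=
  match stack with
  | [] => out.reverse
  | c :: rest =>
    if c = '?' then
      match reps with
      | [] => pvAltLoop rest [] (c :: out)            -- next(it, None) is None: emit '?' unchanged
      | r :: rs => pvAltLoop (r.toList ++ rest) rs out -- stack.extend(reversed(r))
    else pvAltLoop rest reps (c :: out)
termination_by stack.length + (reps.map (fun r => r.toList.length + 1)).sum
decreasing_by all_goals first | (simp; omega) | simp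

def replace_question_marks_alt (word : String) (replacements : List (List String)) : List String :=
  replacements.foldl
    (fun results replacement => results ++ [String.mk (pvAltLoop word.toList replacement [])])
    []

-- ===== PRECONDITION & SPEC =====
def Spec_replace_question_marks (word : String) (replacements : List (List String)) (out : List String) : Prop := out = replace_question_marks_alt word replacements
instance (word : String) (replacements : List (List String)) (out : List String) : Decidable (Spec_replace_question_marks word replacements out) := by unfold Spec_replace_question_marks; infer_instance

-- ===== CLAIM (what is proved, stated in full; the proofs are below) =====
def Claim_equal_replace_question_marks : Prop := ∀ (word : String) (replacements : List (List String)), Dom_replace_question_marks word replacements → Spec_replace_question_marks word replacements (replace_question_marks word replacements)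

-- ===== LEMMAS AND PROOFS =====

-- A's inner loop applied to the empty string stays empty.
theorem pv_applyAll_nil (reps : List String) :
    reps.foldl (fun rw r => pvRepl1 rw r.toList) [] = [] := by
  induction reps with
  | nil => rfl
  | cons r rs ih => simpa [pvRepl1] using ih

-- A non-'?' head passes unchanged through A's whole inner loop.
theorem pv_applyAll_cons (reps : List String) (c : Char) (rest : List Char) (hc : c ≠ '?') :
    reps.foldl (fun rw r => pvRepl1 rw r.toList) (c :: rest)
      = c :: reps.foldl (fun rw r => pvRepl1 rw r.toList) rest := by
  induction reps generalizing rest with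
  | nil => rfl
  | cons r rs ih => simp [pvRepl1, hc, ih]

-- Loop invariant: B's pass computes exactly A's iterated first-'?'-replacement.
theorem pv_loop_eq (stack : List Char) (reps : List String) (out : List Char) :
    pvAltLoop stack reps out
      = out.reverse ++ reps.foldl (fun rw r => pvRepl1 rw r.toList) stack := by
  induction stack, reps, out using pvAltLoop.induct with
  | case1 reps out => simp [pvAltLoop, pv_applyAll_nil]
  | case2 out rest ih =>
      simp [pvAltLoop] at ih ⊢
      simp [ih]
  | case3 out rest r rs ih =>
      simpa [pvAltLoop, pvRepl1] using ih
  | case4 reps out c rest hc ih =>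
      rw [pvAltLoop.eq_def]
      simp [hc, ih, pv_applyAll_cons _ _ _ hc]

-- ===== VERDICT (by name: the statement is the Claim_ definition above) =====
theorem replace_question_marks_spec : Claim_equal_replace_question_marks := by
  intro word replacements _
  unfold Spec_replace_question_marks replace_question_marks replace_question_marks_alt
  simp [pv_loop_eq]
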